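-- pv_equiv track=rewrite | github.com/Berteun/adventofcode2018 | day25/day25.py | find_constellations
-- ===== SOURCE A (Python) =====
-- from collections import defaultdict
--
-- def dist(c1, c2):
--     return sum(abs(a-b) for a,b in zip(c1,c2))
--
-- def find_constellations(coordinates):
--     graph = defaultdict(list)
--
--     for i,c1 in enumerate(coordinates):
--         for j in range(i + 1, len(coordinates)):
--             c2 = coordinates[j]
--             if dist(c1, c2) <= 3:
--                 graph[c1].append(c2)
--                 graph[c2].append(c1)
--
--     count = 0
--     coordinates = set(coordinates)
--     while coordinates:
--         count += 1
--         queue = [coordinates.pop()]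
--         while queue:
--             nb = queue.pop(0)
--             if nb in graph:
--                 queue.extend(graph[nb])
--                 del graph[nb]
--             coordinates.discard(nb)
--
--     return count
-- ===== SOURCE B (Python) =====
-- def find_constellations(coordinates):
--     pts = []
--     for c in coordinates:
--         if c not in pts:
--             pts.append(c)
--     count = 0
--     while pts:
--         comp = [pts[0]]
--         for _ in range(len(pts)):
--             for p in pts:
--                 if p not in comp and any(sum(abs(a - b) for a, b in zip(p, q)) <= 3 for q in comp):
--                     comp.append(p)
--         pts = [p for p in pts if p not in comp]
--         count += 1
--     return count
-- ===== Notes on version B (the rewrite author's own statement) =====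
-- stated objective: alternative
-- what changed: Replaces A's adjacency-dict construction plus queue-based BFS over a shrinking graph by a dedup pass and, per component, repeated fixpoint closure sweeps over the remaining points (no graph, no queue), removing each finished component by an order-preserving filter.
import Mathlib
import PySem

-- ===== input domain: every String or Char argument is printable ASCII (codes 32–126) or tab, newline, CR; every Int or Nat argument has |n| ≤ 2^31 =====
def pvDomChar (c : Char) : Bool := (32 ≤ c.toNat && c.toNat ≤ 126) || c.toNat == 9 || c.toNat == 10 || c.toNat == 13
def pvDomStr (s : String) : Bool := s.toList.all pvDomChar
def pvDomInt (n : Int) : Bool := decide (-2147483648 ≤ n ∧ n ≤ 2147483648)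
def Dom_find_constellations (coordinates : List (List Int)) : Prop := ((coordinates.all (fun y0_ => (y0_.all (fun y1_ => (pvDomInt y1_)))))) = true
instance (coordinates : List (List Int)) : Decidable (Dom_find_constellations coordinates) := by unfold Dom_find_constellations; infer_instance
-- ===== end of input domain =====

-- B replaces A's adjacency-dict construction + BFS by dedup + per-component fixpoint
-- closure sweeps (no graph, no queue): a different decomposition, not claimed faster.
-- A's `coordinates.pop()` on a Python set is modeled as taking the first-inserted
-- element (PySem.Set keeps insertion order); Python's hash order is not modeled, and
-- the equivalence theorem below concerns the returned count.

-- ===== PORT A =====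

-- helper `dist` of A: sum(abs(a-b) for a,b in zip(c1,c2))
def pvDist (c1 c2 : List Int) : Int := ((c1.zip c2).map (fun t => |t.1 - t.2|)).sum

-- the graph-building double loop of A (defaultdict(list); graph[c1].append(c2) = modify with default [])
def pvBuildGraph (coordinates : List (List Int)) : PySem.Dict (List Int) (List (List Int)) :=
  (PySem.List.enumerate coordinates).foldl (fun g ic =>
    (PySem.List.pyRange (ic.1 + 1) (coordinates.length : Int) 1).foldl (fun g j =>
      let c2 := PySem.List.pyGetD coordinates j []
      if pvDist ic.2 c2 ≤ 3 then
        (g.modify ic.2 [] (· ++ [c2])).modify c2 [] (· ++ [ic.2])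
      else g) g) PySem.Dict.empty

-- termination measure for A's inner `while queue` loop
def pvMeasure (g : PySem.Dict (List Int) (List (List Int))) (q : List (List Int)) : Nat :=
  (g.items.map (fun p => p.2.length)).sum + g.items.length + q.length

-- termination facts for the BFS loop (cited in decreasing_by, so they live above the port)
theorem pvErase_measure_aux (l : List ((List Int) × List (List Int))) (nb : List Int) :
    ((l.filter (fun p => !(p.1 == nb))).map (fun p => p.2.length)).sum
      + ((Option.map (fun x => x.2) (l.find? (fun p => p.1 == nb))).getD []).length
      ≤ (l.map (fun p => p.2.length)).sum
    ∧ (l.any (fun p => p.1 == nb) = true →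
        (l.filter (fun p => !(p.1 == nb))).length + 1 ≤ l.length) := by
  induction l with
  | nil => exact ⟨Nat.le_refl 0, fun h => absurd h (by simp)⟩
  | cons p l ih =>
    cases hp : (p.1 == nb) with
    | true =>
      refine ⟨?_, fun _ => ?_⟩
      · simp only [List.filter_cons, List.find?_cons, hp, Bool.not_true, Bool.false_eq_true,
          if_false, List.map_cons, List.sum_cons, Option.map_some, Option.getD_some]
        rw [Nat.add_comm]
        exact Nat.add_le_add_left (((List.filter_sublist).map _).sum_le_sum (fun _ _ => Nat.zero_le _)) _
      · simp only [List.filter_cons, hp, Bool.not_true, Bool.false_eq_true, if_false,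
          List.length_cons]
        exact Nat.succ_le_succ (List.length_filter_le _ l)
    | false =>
      refine ⟨?_, ?_⟩
      · simp only [List.filter_cons, List.find?_cons, hp, Bool.not_false, if_true,
          List.map_cons, List.sum_cons]
        rw [Nat.add_assoc]
        exact Nat.add_le_add_left ih.1 _
      · intro h
        rw [List.any_cons, hp, Bool.false_or] at h
        simp only [List.filter_cons, hp, Bool.not_false, if_true, List.length_cons]
        exact Nat.succ_le_succ (ih.2 h)

theorem pvErase_measure (g : PySem.Dict (List Int) (List (List Int))) (nb : List Int)
    (h : g.contains nb = true) :
    ((g.erase nb).items.map (fun p => p.2.length)).sum + (g.getD nb []).length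
      ≤ (g.items.map (fun p => p.2.length)).sum
    ∧ (g.erase nb).items.length + 1 ≤ g.items.length := by
  have := pvErase_measure_aux g.items nb
  exact ⟨this.1, this.2 h⟩

theorem pvDec_key (g : PySem.Dict (List Int) (List (List Int))) (nb : List Int)
    (rest : List (List Int)) (h : g.contains nb = true) :
    pvMeasure (g.erase nb) (rest ++ g.getD nb []) < pvMeasure g (nb :: rest) := by
  have h1 := (pvErase_measure g nb h).1
  have h2 := (pvErase_measure g nb h).2
  unfold pvMeasure
  rw [List.length_append, List.length_cons]
  omega

theorem pvDec_nokey (g : PySem.Dict (List Int) (List (List Int))) (nb : List Int)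
    (rest : List (List Int)) : pvMeasure g rest < pvMeasure g (nb :: rest) := by
  unfold pvMeasure
  rw [List.length_cons]
  exact Nat.add_lt_add_left (Nat.lt_succ_self _) _

-- A's inner `while queue:` loop (queue.pop(0); extend with graph[nb]; del graph[nb]; set.discard)
def pvBfs (queue : List (List Int)) (S : PySem.Set (List Int))
    (g : PySem.Dict (List Int) (List (List Int))) :
    PySem.Set (List Int) × PySem.Dict (List Int) (List (List Int)) :=
  match queue with
  | [] => (S, g)
  | nb :: rest =>
    if h : g.contains nb = true then
      pvBfs (rest ++ g.getD nb []) (PySem.Set.discard S nb) (g.erase nb)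
    else
      pvBfs rest (PySem.Set.discard S nb) g
termination_by pvMeasure g queue
decreasing_by
  · exact pvDec_key g nb rest h
  · exact pvDec_nokey g nb rest

theorem pvBfs_fst_sublist (queue : List (List Int)) (S : PySem.Set (List Int))
    (g : PySem.Dict (List Int) (List (List Int))) : (pvBfs queue S g).1.Sublist S := by
  fun_induction pvBfs with
  | case1 => exact List.Sublist.refl _
  | case2 S g nb rest h ih => exact ih.trans List.filter_sublist
  | case3 S g nb rest h ih => exact ih.trans List.filter_sublist

-- A's outer `while coordinates:` loop (pop one point, BFS its whole component away, count += 1)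
def pvLoopA (S : PySem.Set (List Int)) (g : PySem.Dict (List Int) (List (List Int)))
    (count : Int) : Int :=
  match S with
  | [] => count
  | x :: rest =>
    let r := pvBfs [x] rest g
    pvLoopA r.1 r.2 (count + 1)
termination_by S.length
decreasing_by
  exact Nat.lt_succ_of_le (pvBfs_fst_sublist [x] rest g).length_le

def find_constellations (coordinates : List (List Int)) : Int :=
  let graph := pvBuildGraph coordinates
  pvLoopA (PySem.Set.ofList coordinates) graph 0

-- ===== PORT B =====

-- one sweep of B: `for p in pts: if p not in comp and any(dist(p,q) <= 3 for q in comp): comp.append(p)`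
def pvSweep (pts comp : List (List Int)) : List (List Int) :=
  pts.foldl (fun comp p =>
    if p ∉ comp ∧ (comp.any (fun q => decide (((p.zip q).map (fun t => |t.1 - t.2|)).sum ≤ 3))) = true
    then comp ++ [p] else comp) comp

theorem pvSweep_suffix (pts : List (List Int)) : ∀ comp : List (List Int),
    ∃ e, pvSweep pts comp = comp ++ e := by
  unfold pvSweep
  induction pts with
  | nil => exact fun comp => ⟨[], by simp⟩
  | cons p pts ih =>
    intro comp
    simp only [List.foldl_cons]
    split
    · obtain ⟨e, he⟩ := ih (comp ++ [p])
      exact ⟨p :: e, by simpa using he⟩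
    · exact ih comp

theorem pvSweep_mem_mono (pts comp : List (List Int)) (v : List Int) (h : v ∈ comp) :
    v ∈ pvSweep pts comp := by
  obtain ⟨e, he⟩ := pvSweep_suffix pts comp
  rw [he]; exact List.mem_append_left _ h

theorem pvSweepIter_mem (pts : List (List Int)) (n : Nat) (x : List Int) :
    x ∈ (List.range n).foldl (fun c _ => pvSweep pts c) [x] := by
  induction n with
  | zero => exact List.mem_singleton.mpr rfl
  | succ n ih =>
    rw [List.range_succ, List.foldl_append]
    exact pvSweep_mem_mono _ _ _ ih

theorem pvDecB (x : List Int) (tail : List (List Int)) :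
    ((x :: tail).filter (fun p => decide (p ∉
        (List.range (x :: tail).length).foldl (fun c _ => pvSweep (x :: tail) c) [x]))).length
      < (x :: tail).length := by
  rw [List.length_cons, List.filter_cons]
  split
  · next hcond =>
    exact absurd (pvSweepIter_mem (x :: tail) (x :: tail).length x)
      (by simpa [List.length_cons] using hcond)
  · exact Nat.lt_succ_of_le (List.length_filter_le _ _)

-- B's outer `while pts:` loop
def pvLoopB : List (List Int) → Int → Int
  | [], count => count
  | x :: tail, count =>
    let pts := x :: tail
    let comp := (List.range pts.length).foldl (fun c _ => pvSweep pts c) [x]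
    pvLoopB (pts.filter (fun p => decide (p ∉ comp))) (count + 1)
termination_by pts _ => pts.length
decreasing_by
  exact pvDecB x tail

def find_constellations_alt (coordinates : List (List Int)) : Int :=
  let pts := coordinates.foldl (fun pts c => if c ∈ pts then pts else pts ++ [c]) []
  pvLoopB pts 0

-- ===== PRECONDITION & SPEC =====
def Spec_find_constellations (coordinates : List (List Int)) (out : Int) : Prop := out = find_constellations_alt coordinates
instance (coordinates : List (List Int)) (out : Int) : Decidable (Spec_find_constellations coordinates out) := by unfold Spec_find_constellations; infer_instance

-- ===== CLAIM (what is proved, stated in full; the proofs are below) =====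
def Claim_equal_find_constellations : Prop := ∀ (coordinates : List (List Int)), Dom_find_constellations coordinates → Spec_find_constellations coordinates (find_constellations coordinates)

-- ===== LEMMAS AND PROOFS =====

-- The "close" relation on points of the input, its reflexive-transitive closure, and
-- the edge relation of a (partially erased) adjacency dict.

def pvCrel (coords : List (List Int)) (v w : List Int) : Prop :=
  v ∈ coords ∧ w ∈ coords ∧ pvDist v w ≤ 3

def pvReach (coords : List (List Int)) (x v : List Int) : Prop :=
  Relation.ReflTransGen (pvCrel coords) x v

def pvEG (g : PySem.Dict (List Int) (List (List Int))) (v w : List Int) : Prop :=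
  g.contains v = true ∧ w ∈ g.getD v []

-- the (i, j) double loop of A, flattened into the list of directed close pairs it inserts
def pvPairs (coords : List (List Int)) : List ((List Int) × (List Int)) :=
  (PySem.List.enumerate coords).flatMap (fun ic =>
    (PySem.List.pyRange (ic.1 + 1) (coords.length : Int) 1).flatMap (fun j =>
      let c2 := PySem.List.pyGetD coords j []
      if pvDist ic.2 c2 ≤ 3 then [(ic.2, c2), (c2, ic.2)] else []))

theorem pvDist_comm (v w : List Int) : pvDist v w = pvDist w v := by
  unfold pvDist
  rw [← List.zip_swap v w, List.map_map]
  simp [Function.comp_def, abs_sub_comm]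

theorem pvCrel_symm (coords : List (List Int)) : Symmetric (pvCrel coords) := by
  rintro v w ⟨hv, hw, hd⟩
  exact ⟨hw, hv, by rwa [pvDist_comm]⟩

theorem pvReach_trans (coords : List (List Int)) {x v u : List Int}
    (h1 : pvReach coords x v) (h2 : pvReach coords v u) : pvReach coords x u :=
  Relation.ReflTransGen.trans h1 h2

theorem pvBuildGraph_eq (coords : List (List Int)) :
    pvBuildGraph coords
      = (pvPairs coords).foldl (fun d p => d.modify p.1 [] (· ++ [p.2])) PySem.Dict.empty := by
  unfold pvBuildGraph pvPairs
  rw [List.foldl_flatMap]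
  congr 1
  funext g ic
  rw [List.foldl_flatMap]
  congr 1
  funext g j
  dsimp only
  split <;> rfl

theorem pvAdj_eq (coords : List (List Int)) (v : List Int) :
    (pvBuildGraph coords).getD v []
      = ((pvPairs coords).filter (fun p => p.1 == v)).map (fun p => p.2) := by
  rw [pvBuildGraph_eq, PySem.Dict.getD_foldl_modify_append]
  simp [PySem.Dict.getD_empty]

theorem pvMem_adj (coords : List (List Int)) (v w : List Int) :
    w ∈ (pvBuildGraph coords).getD v [] ↔ (v, w) ∈ pvPairs coords := by
  rw [pvAdj_eq]
  constructor
  · rintro h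
    simp only [List.mem_map, List.mem_filter] at h
    obtain ⟨⟨a, b⟩, ⟨hmem, hbeq⟩, rfl⟩ := h
    simp only [beq_iff_eq] at hbeq
    subst hbeq
    exact hmem
  · intro h
    simp only [List.mem_map, List.mem_filter]
    exact ⟨(v, w), ⟨h, by simp⟩, rfl⟩

theorem pvPairs_crel (coords : List (List Int)) (v w : List Int)
    (h : (v, w) ∈ pvPairs coords) : pvCrel coords v w := by
  unfold pvPairs at h
  simp only [List.mem_flatMap] at h
  obtain ⟨ic, hic, j, hj, hmem⟩ := h
  rw [PySem.List.mem_enumerate_iff] at hic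
  obtain ⟨k, hk, rfl⟩ := hic
  rw [PySem.List.mem_pyRange_one] at hj
  simp only [zero_add] at *
  have hj0 : (0 : Int) ≤ j := le_trans (by omega) hj.1
  have hjn : j.toNat < coords.length := by omega
  have hc2 : PySem.List.pyGetD coords j [] = coords[j.toNat] := by
    conv_lhs => rw [show j = ((j.toNat : Nat) : Int) from (Int.toNat_of_nonneg hj0).symm]
    rw [PySem.List.pyGetD_natCast, List.getD_eq_getElem]
  split at hmem
  · rename_i hclose
    rw [hc2] at hmem hclose
    have h1 : coords[k] ∈ coords := List.getElem_mem hk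
    have h2 : coords[j.toNat] ∈ coords := List.getElem_mem hjn
    simp only [List.mem_cons, List.not_mem_nil, or_false] at hmem
    rcases hmem with h | h
    · obtain ⟨h1', h2'⟩ := Prod.ext_iff.mp h
      subst h1'; subst h2'
      exact ⟨h1, h2, hclose⟩
    · obtain ⟨h1', h2'⟩ := Prod.ext_iff.mp h
      subst h1'; subst h2'
      exact ⟨h2, h1, by rwa [pvDist_comm]⟩
  · simp at hmem

theorem pvPairs_of_crel (coords : List (List Int)) (v w : List Int) (hne : v ≠ w)
    (h : pvCrel coords v w) : (v, w) ∈ pvPairs coords := by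
  obtain ⟨hv, hw, hd⟩ := h
  obtain ⟨iv, hiv, hv'⟩ := List.getElem_of_mem hv
  obtain ⟨iw, hiw, hw'⟩ := List.getElem_of_mem hw
  have hne' : iv ≠ iw := by
    rintro rfl; exact hne (hv'.symm.trans hw')
  unfold pvPairs
  simp only [List.mem_flatMap]
  rcases Nat.lt_or_ge iv iw with hlt | hge
  · refine ⟨((iv : Int), coords[iv]), ?_, (iw : Int), ?_, ?_⟩
    · rw [PySem.List.mem_enumerate_iff]; exact ⟨iv, hiv, by simp⟩
    · rw [PySem.List.mem_pyRange_one]; constructor <;> [omega; exact_mod_cast hiw]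
    · have hc2 : PySem.List.pyGetD coords (iw : Int) [] = coords[iw] := by
        rw [PySem.List.pyGetD_natCast, List.getD_eq_getElem]
      simp only [hc2, hv', hw']
      rw [if_pos hd]
      simp
  · have hlt : iw < iv := lt_of_le_of_ne hge (Ne.symm hne')
    refine ⟨((iw : Int), coords[iw]), ?_, (iv : Int), ?_, ?_⟩
    · rw [PySem.List.mem_enumerate_iff]; exact ⟨iw, hiw, by simp⟩
    · rw [PySem.List.mem_pyRange_one]; constructor <;> [omega; exact_mod_cast hiv]
    · have hc2 : PySem.List.pyGetD coords (iv : Int) [] = coords[iv] := by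
        rw [PySem.List.pyGetD_natCast, List.getD_eq_getElem]
      simp only [hc2, hv', hw']
      rw [if_pos (by rw [pvDist_comm]; exact hd)]
      simp

theorem pvAdjG0_crel (coords : List (List Int)) (v w : List Int)
    (h : w ∈ (pvBuildGraph coords).getD v []) : pvCrel coords v w :=
  pvPairs_crel coords v w ((pvMem_adj coords v w).mp h)

theorem pvAdjG0_of_crel (coords : List (List Int)) (v w : List Int) (hne : v ≠ w)
    (h : pvCrel coords v w) :
    (pvBuildGraph coords).contains v = true ∧ w ∈ (pvBuildGraph coords).getD v [] := by
  have hmem : w ∈ (pvBuildGraph coords).getD v [] :=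
    (pvMem_adj coords v w).mpr (pvPairs_of_crel coords v w hne h)
  refine ⟨?_, hmem⟩
  by_contra hc
  have : (pvBuildGraph coords).getD v [] = [] := by
    apply PySem.Dict.getD_of_not_contains
    simpa using hc
  rw [this] at hmem
  exact absurd hmem (List.not_mem_nil)

-- Facts about Dict.erase and dict submaps.

theorem pvFind?_filter {α : Type} (l : List α) (p q : α → Bool)
    (h : ∀ a, p a = true → q a = true) : (l.filter q).find? p = l.find? p := by
  induction l with
  | nil => rfl
  | cons a l ih =>
    by_cases hq : q a = true
    · rw [List.filter_cons_of_pos hq, List.find?_cons, List.find?_cons]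
      cases hp : p a <;> simp [ih]
    · have hp : p a = false := by
        cases hp : p a
        · rfl
        · exact absurd (h a hp) (by simpa using hq)
      rw [List.filter_cons_of_neg (by simpa using hq), List.find?_cons, hp]
      simpa [hp] using ih

theorem pvErase_get?_of_ne (g : PySem.Dict (List Int) (List (List Int))) (nb k : List Int)
    (h : k ≠ nb) : (g.erase nb).get? k = g.get? k := by
  show Option.map _ (((g.items.filter _)).find? _) = _
  rw [pvFind?_filter]
  · rfl
  · intro a ha
    simp only [beq_iff_eq] at ha ⊢
    simp [ha, h]

theorem pvErase_getD_of_ne (g : PySem.Dict (List Int) (List (List Int))) (nb k : List Int)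
    (h : k ≠ nb) : (g.erase nb).getD k [] = g.getD k [] := by
  show ((g.erase nb).get? k).getD [] = (g.get? k).getD []
  rw [pvErase_get?_of_ne g nb k h]

theorem pvErase_contains_self (g : PySem.Dict (List Int) (List (List Int))) (nb : List Int) :
    (g.erase nb).contains nb = false := by
  show (g.items.filter _).any _ = false
  rw [List.any_filter]
  simp

theorem pvErase_contains_of_ne (g : PySem.Dict (List Int) (List (List Int))) (nb k : List Int)
    (h : k ≠ nb) : (g.erase nb).contains k = g.contains k := by
  show (g.items.filter _).any _ = g.items.any _
  rw [List.any_filter]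
  congr 1
  funext p
  by_cases hp : p.1 = k <;> simp [hp, h]

theorem pvErase_contains_ne (g : PySem.Dict (List Int) (List (List Int))) (nb k : List Int)
    (h : (g.erase nb).contains k = true) : k ≠ nb ∧ g.contains k = true := by
  by_cases hk : k = nb
  · subst hk; rw [pvErase_contains_self] at h; exact absurd h (by simp)
  · rw [pvErase_contains_of_ne g nb k hk] at h; exact ⟨hk, h⟩

def pvSub (g h : PySem.Dict (List Int) (List (List Int))) : Prop :=
  ∀ k, g.contains k = true → h.contains k = true ∧ g.getD k [] = h.getD k []

theorem pvSub_refl (g : PySem.Dict (List Int) (List (List Int))) : pvSub g g :=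
  fun _ h => ⟨h, rfl⟩

theorem pvSub_trans {g h i : PySem.Dict (List Int) (List (List Int))}
    (h1 : pvSub g h) (h2 : pvSub h i) : pvSub g i := by
  intro k hk
  obtain ⟨ha, hb⟩ := h1 k hk
  obtain ⟨hc, hd⟩ := h2 k ha
  exact ⟨hc, hb.trans hd⟩

theorem pvErase_sub (g : PySem.Dict (List Int) (List (List Int))) (nb : List Int) :
    pvSub (g.erase nb) g := by
  intro k hk
  obtain ⟨hne, hc⟩ := pvErase_contains_ne g nb k hk
  exact ⟨hc, pvErase_getD_of_ne g nb k hne⟩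

theorem pvEG_erase_le (g : PySem.Dict (List Int) (List (List Int))) (nb : List Int) :
    ∀ a b, pvEG (g.erase nb) a b → pvEG g a b := by
  rintro a b ⟨hc, hm⟩
  obtain ⟨h1, h2⟩ := pvErase_sub g nb a hc
  rw [h2] at hm
  exact ⟨h1, hm⟩

-- The ghost list of vertices A's BFS loop processes (same recursion as pvBfs).
def pvPset (queue : List (List Int)) (g : PySem.Dict (List Int) (List (List Int))) :
    List (List Int) :=
  match queue with
  | [] => []
  | nb :: rest =>
    if g.contains nb = true then nb :: pvPset (rest ++ g.getD nb []) (g.erase nb)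
    else nb :: pvPset rest g
termination_by pvMeasure g queue
decreasing_by
  · exact pvDec_key g nb rest (by assumption)
  · exact pvDec_nokey g nb rest

theorem pvPset_nil (g : PySem.Dict (List Int) (List (List Int))) : pvPset [] g = [] := by
  rw [pvPset]

theorem pvPset_cons_pos (g : PySem.Dict (List Int) (List (List Int))) (nb : List Int)
    (rest : List (List Int)) (h : g.contains nb = true) :
    pvPset (nb :: rest) g = nb :: pvPset (rest ++ g.getD nb []) (g.erase nb) := by
  rw [pvPset, if_pos h]

theorem pvPset_cons_neg (g : PySem.Dict (List Int) (List (List Int))) (nb : List Int)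
    (rest : List (List Int)) (h : ¬ g.contains nb = true) :
    pvPset (nb :: rest) g = nb :: pvPset rest g := by
  rw [pvPset, if_neg h]

-- What A's BFS loop does to the point set: it filters out exactly the processed vertices.

theorem pvBfs_fst (queue : List (List Int)) (S : PySem.Set (List Int))
    (g : PySem.Dict (List Int) (List (List Int))) :
    (pvBfs queue S g).1 = S.filter (fun v => decide (v ∉ pvPset queue g)) := by
  fun_induction pvBfs with
  | case1 S g => rw [pvPset_nil]; simp
  | case2 S g nb rest h ih =>
    rw [ih, pvPset_cons_pos g nb rest h]
    show (S.filter _).filter _ = _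
    rw [List.filter_filter]
    apply List.filter_congr
    intro v _
    by_cases h1 : v = nb <;> by_cases h2 : v ∈ pvPset (rest ++ g.getD nb []) (g.erase nb) <;>
      simp [h1, h2]
  | case3 S g nb rest h ih =>
    rw [ih, pvPset_cons_neg g nb rest h]
    show (S.filter _).filter _ = _
    rw [List.filter_filter]
    apply List.filter_congr
    intro v _
    by_cases h1 : v = nb <;> by_cases h2 : v ∈ pvPset rest g <;> simp [h1, h2]

theorem pvBfs_snd_sub (queue : List (List Int)) (S : PySem.Set (List Int))
    (g : PySem.Dict (List Int) (List (List Int))) : pvSub (pvBfs queue S g).2 g := by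
  fun_induction pvBfs with
  | case1 S g => exact pvSub_refl g
  | case2 S g nb rest h ih => exact pvSub_trans ih (pvErase_sub g nb)
  | case3 S g nb rest h ih => exact ih

theorem pvBfs_snd_keep (queue : List (List Int)) (S : PySem.Set (List Int))
    (g : PySem.Dict (List Int) (List (List Int))) :
    ∀ k, g.contains k = true → k ∉ pvPset queue g → (pvBfs queue S g).2.contains k = true := by
  fun_induction pvBfs with
  | case1 S g => exact fun k hk _ => hk
  | case2 S g nb rest h ih =>
    intro k hk hnp
    rw [pvPset_cons_pos g nb rest h] at hnp
    simp only [List.mem_cons, not_or] at hnp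
    exact ih k (by rw [pvErase_contains_of_ne g nb k hnp.1]; exact hk) hnp.2
  | case3 S g nb rest h ih =>
    intro k hk hnp
    rw [pvPset_cons_neg g nb rest h] at hnp
    simp only [List.mem_cons, not_or] at hnp
    exact ih k hk hnp.2

-- The processed vertices are exactly those reachable from the queue in the current graph.

theorem pvPset_sound (queue : List (List Int)) (g : PySem.Dict (List Int) (List (List Int))) :
    ∀ v ∈ pvPset queue g, ∃ q ∈ queue, Relation.ReflTransGen (pvEG g) q v := by
  fun_induction pvPset with
  | case1 g => simp
  | case2 g nb rest h ih =>
    intro v hv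
    rcases List.mem_cons.mp hv with rfl | hv
    · exact ⟨v, List.mem_cons_self, Relation.ReflTransGen.refl⟩
    · obtain ⟨q, hq, hrt⟩ := ih v hv
      have hrt' : Relation.ReflTransGen (pvEG g) q v :=
        Relation.ReflTransGen.mono (pvEG_erase_le g nb) hrt
      rcases List.mem_append.mp hq with hq | hq
      · exact ⟨q, List.mem_cons_of_mem _ hq, hrt'⟩
      · exact ⟨nb, List.mem_cons_self, Relation.ReflTransGen.head ⟨h, hq⟩ hrt'⟩
  | case3 g nb rest h ih =>
    intro v hv
    rcases List.mem_cons.mp hv with rfl | hv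
    · exact ⟨v, List.mem_cons_self, Relation.ReflTransGen.refl⟩
    · obtain ⟨q, hq, hrt⟩ := ih v hv
      exact ⟨q, List.mem_cons_of_mem _ hq, hrt⟩

theorem pvReroute (g : PySem.Dict (List Int) (List (List Int))) (nb : List Int)
    {q v : List Int} (hrt : Relation.ReflTransGen (pvEG g) q v) :
    Relation.ReflTransGen (pvEG (g.erase nb)) q v
      ∨ ∃ w ∈ g.getD nb [], Relation.ReflTransGen (pvEG (g.erase nb)) w v := by
  induction hrt using Relation.ReflTransGen.head_induction_on with
  | refl => exact Or.inl Relation.ReflTransGen.refl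
  | head hstep _ ih =>
    rename_i a c _
    rcases ih with ih | ih
    · by_cases ha : a = nb
      · subst ha
        exact Or.inr ⟨c, hstep.2, ih⟩
      · refine Or.inl (Relation.ReflTransGen.head ?_ ih)
        exact ⟨by rw [pvErase_contains_of_ne g nb a ha]; exact hstep.1,
               by rw [pvErase_getD_of_ne g nb a ha]; exact hstep.2⟩
    · exact Or.inr ih

theorem pvPset_complete (queue : List (List Int)) (g : PySem.Dict (List Int) (List (List Int))) :
    ∀ q v, q ∈ queue → Relation.ReflTransGen (pvEG g) q v → v ∈ pvPset queue g := by
  fun_induction pvPset with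
  | case1 g => simp
  | case2 g nb rest h ih =>
    intro q v hq hrt
    rcases List.mem_cons.mp hq with rfl | hq
    · rcases Relation.ReflTransGen.cases_head hrt with rfl | ⟨u, hstep, hrt'⟩
      · exact List.mem_cons_self
      · have hu : u ∈ g.getD q [] := hstep.2
        rcases pvReroute g q hrt' with h' | ⟨w, hw, h'⟩
        · exact List.mem_cons_of_mem _ (ih u v (List.mem_append_right _ hu) h')
        · exact List.mem_cons_of_mem _ (ih w v (List.mem_append_right _ hw) h')
    · rcases pvReroute g nb hrt with h' | ⟨w, hw, h'⟩
      · exact List.mem_cons_of_mem _ (ih q v (List.mem_append_left _ hq) h')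
      · exact List.mem_cons_of_mem _ (ih w v (List.mem_append_right _ hw) h')
  | case3 g nb rest h ih =>
    intro q v hq hrt
    rcases List.mem_cons.mp hq with rfl | hq
    · rcases Relation.ReflTransGen.cases_head hrt with rfl | ⟨u, hstep, _⟩
      · exact List.mem_cons_self
      · exact absurd hstep.1 (by simpa using h)
    · exact List.mem_cons_of_mem _ (ih q v hq hrt)

-- The cross-round invariant: g is the built graph minus keys of already removed
-- components, removed graph keys are also removed points, removed points are
-- disconnected from the remaining ones, and S is a dedup sublist of the input.

def pvINV (coords : List (List Int)) (S : List (List Int))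
    (g : PySem.Dict (List Int) (List (List Int))) : Prop :=
  pvSub g (pvBuildGraph coords)
  ∧ (∀ k ∈ S, (pvBuildGraph coords).contains k = true → g.contains k = true)
  ∧ (∀ v ∈ coords, v ∉ S → ∀ u ∈ S, ¬ pvReach coords v u)
  ∧ S.Sublist (PySem.Set.ofList coords)

theorem pvINV_S_mem (coords S g) (hinv : pvINV coords S g) : ∀ v ∈ S, v ∈ coords := by
  intro v hv
  exact (PySem.Set.mem_ofList coords v).mp (hinv.2.2.2.mem hv)

theorem pvINV_S_nodup (coords S g) (hinv : pvINV coords S g) : S.Nodup :=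
  (PySem.Set.nodup_ofList coords).sublist hinv.2.2.2

theorem pvReach_mem_S (coords S g) (hinv : pvINV coords S g) {x : List Int} (hx : x ∈ S)
    {v : List Int} (h : pvReach coords x v) : v ∈ S := by
  induction h with
  | refl => exact hx
  | tail _ hcrel ih =>
    rename_i u v _
    by_contra hvs
    exact hinv.2.2.1 v hcrel.2.1 hvs u ih (Relation.ReflTransGen.single (pvCrel_symm coords hcrel))

theorem pvEG_sub_crel (coords : List (List Int)) (g : PySem.Dict (List Int) (List (List Int)))
    (hsub : pvSub g (pvBuildGraph coords)) {v w : List Int} (h : pvEG g v w) :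
    pvCrel coords v w := by
  obtain ⟨hc, hm⟩ := h
  obtain ⟨_, heq⟩ := hsub v hc
  rw [heq] at hm
  exact pvAdjG0_crel coords v w hm

theorem pvReach_RT_EG (coords S g) (hinv : pvINV coords S g) {x : List Int} (hx : x ∈ S)
    {v : List Int} (h : pvReach coords x v) : Relation.ReflTransGen (pvEG g) x v := by
  induction h with
  | refl => exact Relation.ReflTransGen.refl
  | tail hxu hcrel ih =>
    rename_i u v
    by_cases hne : u = v
    · subst hne; exact ih
    · have huS : u ∈ S := pvReach_mem_S coords S g hinv hx hxu
      obtain ⟨hcont, hmem⟩ := pvAdjG0_of_crel coords u v hne hcrel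
      have hgc : g.contains u = true := hinv.2.1 u huS hcont
      have hgetD : g.getD u [] = (pvBuildGraph coords).getD u [] := (hinv.1 u hgc).2
      exact Relation.ReflTransGen.tail ih ⟨hgc, by rw [hgetD]; exact hmem⟩

theorem pvPset_iff_reach (coords S g) (hinv : pvINV coords S g) {x : List Int} (hx : x ∈ S)
    (v : List Int) : v ∈ pvPset [x] g ↔ pvReach coords x v := by
  constructor
  · intro hv
    obtain ⟨q, hq, hrt⟩ := pvPset_sound [x] g v hv
    simp only [List.mem_singleton] at hq
    subst hq
    exact Relation.ReflTransGen.mono (fun a b hab => pvEG_sub_crel coords g hinv.1 hab) hrt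
  · intro h
    exact pvPset_complete [x] g x v (List.mem_singleton.mpr rfl)
      (pvReach_RT_EG coords S g hinv hx h)

-- B-side: the sweep step, growth and closedness of the iterated sweeps.

def pvStep (comp : List (List Int)) (p : List Int) : List (List Int) :=
  if p ∉ comp ∧ (comp.any fun q => decide (((p.zip q).map (fun t => |t.1 - t.2|)).sum ≤ 3)) = true
  then comp ++ [p] else comp

theorem pvSweep_eq_foldl_step (pts comp : List (List Int)) :
    pvSweep pts comp = pts.foldl pvStep comp := rfl

theorem pvStep_length_mono (comp : List (List Int)) (p : List Int) :
    comp.length ≤ (pvStep comp p).length := by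
  unfold pvStep; split <;> simp

theorem pvSweep_length_mono (l comp : List (List Int)) :
    comp.length ≤ (pvSweep l comp).length := by
  obtain ⟨e, he⟩ := pvSweep_suffix l comp
  rw [he]; simp

theorem pvCond_iff (comp : List (List Int)) (p : List Int) :
    (p ∉ comp ∧ (comp.any fun q => decide (((p.zip q).map (fun t => |t.1 - t.2|)).sum ≤ 3)) = true)
      ↔ (p ∉ comp ∧ ∃ q ∈ comp, pvDist p q ≤ 3) := by
  rw [List.any_eq_true]
  unfold pvDist
  simp

theorem pvSweep_inv (coords : List (List Int)) (x : List Int) (S : List (List Int))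
    (hS : ∀ p ∈ S, p ∈ coords) :
    ∀ (l comp : List (List Int)), (∀ p ∈ l, p ∈ S) →
      (comp ⊆ S ∧ comp.Nodup ∧ ∀ v ∈ comp, pvReach coords x v) →
      ((pvSweep l comp) ⊆ S ∧ (pvSweep l comp).Nodup ∧ ∀ v ∈ pvSweep l comp, pvReach coords x v) := by
  intro l
  induction l with
  | nil => intro comp _ h; exact h
  | cons p l ih =>
    intro comp hl hcomp
    have hstep : pvSweep (p :: l) comp = pvSweep l (pvStep comp p) := by
      rw [pvSweep_eq_foldl_step, List.foldl_cons]; rfl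
    rw [hstep]
    refine ih (pvStep comp p) (fun q hq => hl q (List.mem_cons_of_mem _ hq)) ?_
    unfold pvStep
    split
    · rename_i hcond
      obtain ⟨hpc, q, hq, hdist⟩ := (pvCond_iff comp p).mp hcond
      have hpS : p ∈ S := hl p List.mem_cons_self
      refine ⟨?_, ?_, ?_⟩
      · intro v hv
        rcases List.mem_append.mp hv with hv | hv
        · exact hcomp.1 hv
        · rw [List.mem_singleton] at hv; subst hv; exact hpS
      · rw [List.nodup_append]
        refine ⟨hcomp.2.1, List.nodup_singleton p, ?_⟩
        intro a ha b hb
        rw [List.mem_singleton] at hb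
        subst hb
        intro heq
        subst heq
        exact hpc ha
      · intro v hv
        rcases List.mem_append.mp hv with hv | hv
        · exact hcomp.2.2 v hv
        · rw [List.mem_singleton] at hv; subst hv
          refine Relation.ReflTransGen.tail (hcomp.2.2 q hq) ?_
          exact ⟨hS q (hcomp.1 hq), hS v hpS, by rwa [pvDist_comm]⟩
    · exact hcomp

def pvClosed (S comp : List (List Int)) : Prop :=
  ∀ p ∈ S, ∀ q ∈ comp, pvDist p q ≤ 3 → p ∈ comp

theorem pvSweep_of_closed (S comp : List (List Int)) (hc : pvClosed S comp) :
    ∀ l, (∀ p ∈ l, p ∈ S) → pvSweep l comp = comp := by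
  intro l
  induction l with
  | nil => intro _; rfl
  | cons p l ih =>
    intro hl
    have hstep : pvSweep (p :: l) comp = pvSweep l (pvStep comp p) := by
      rw [pvSweep_eq_foldl_step, List.foldl_cons]; rfl
    have hno : pvStep comp p = comp := by
      unfold pvStep
      rw [if_neg]
      intro hcond
      obtain ⟨hpc, q, hq, hdist⟩ := (pvCond_iff comp p).mp hcond
      exact hpc (hc p (hl p List.mem_cons_self) q hq hdist)
    rw [hstep, hno]
    exact ih (fun q hq => hl q (List.mem_cons_of_mem _ hq))

theorem pvSweep_grow (S comp : List (List Int)) (hnc : ¬ pvClosed S comp) :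
    comp.length < (pvSweep S comp).length := by
  unfold pvClosed at hnc
  push_neg at hnc
  obtain ⟨p, hpS, q, hq, hdist, hpc⟩ := hnc
  obtain ⟨l₁, l₂, rfl⟩ := List.append_of_mem hpS
  have hsplit : pvSweep (l₁ ++ p :: l₂) comp = pvSweep l₂ (pvStep (pvSweep l₁ comp) p) := by
    rw [pvSweep_eq_foldl_step, List.foldl_append, List.foldl_cons]; rfl
  obtain ⟨e₁, he₁⟩ := pvSweep_suffix l₁ comp
  rw [hsplit]
  by_cases hp1 : p ∈ pvSweep l₁ comp
  · have he₁ne : e₁ ≠ [] := by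
      rintro rfl
      rw [List.append_nil] at he₁
      rw [he₁] at hp1
      exact hpc hp1
    have h1 : comp.length < (pvSweep l₁ comp).length := by
      rw [he₁, List.length_append]
      have : 0 < e₁.length := List.length_pos_of_ne_nil he₁ne
      omega
    have h2 := pvStep_length_mono (pvSweep l₁ comp) p
    have h3 := pvSweep_length_mono l₂ (pvStep (pvSweep l₁ comp) p)
    omega
  · have hstep : pvStep (pvSweep l₁ comp) p = pvSweep l₁ comp ++ [p] := by
      unfold pvStep
      rw [if_pos]
      refine ⟨hp1, ?_⟩
      rw [List.any_eq_true]
      refine ⟨q, by rw [he₁]; exact List.mem_append_left _ hq, ?_⟩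
      simpa [pvDist] using hdist
    have h1 := pvSweep_length_mono l₁ comp
    have h3 := pvSweep_length_mono l₂ (pvStep (pvSweep l₁ comp) p)
    rw [hstep] at h3 ⊢
    simp only [List.length_append, List.length_cons, List.length_nil] at *
    omega

theorem pvLen_le (l S : List (List Int)) (hnd : l.Nodup) (hsub : l ⊆ S) :
    l.length ≤ S.length := by
  calc l.length = l.toFinset.card := (List.toFinset_card_of_nodup hnd).symm
    _ ≤ S.toFinset.card := Finset.card_le_card (fun a ha => by
        rw [List.mem_toFinset] at *; exact hsub ha)
    _ ≤ S.length := S.toFinset_card_le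

theorem pvIter_inv (coords : List (List Int)) (x : List Int) (S : List (List Int))
    (hS : ∀ p ∈ S, p ∈ coords) (hx : x ∈ S) (n : Nat) :
    ((List.range n).foldl (fun c _ => pvSweep S c) [x]) ⊆ S
    ∧ ((List.range n).foldl (fun c _ => pvSweep S c) [x]).Nodup
    ∧ ∀ v ∈ (List.range n).foldl (fun c _ => pvSweep S c) [x], pvReach coords x v := by
  induction n with
  | zero =>
    refine ⟨?_, by simp, ?_⟩
    · intro v hv
      rw [List.range_zero, List.foldl_nil, List.mem_singleton] at hv
      subst hv; exact hx
    · intro v hv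
      rw [List.range_zero, List.foldl_nil, List.mem_singleton] at hv
      subst hv; exact Relation.ReflTransGen.refl
  | succ n ih =>
    rw [List.range_succ, List.foldl_append, List.foldl_cons, List.foldl_nil]
    exact pvSweep_inv coords x S hS S _ (fun p hp => hp) ih

theorem pvIter_closed (S : List (List Int)) (x : List Int) (hx : x ∈ S) (hnd : S.Nodup) :
    pvClosed S ((List.range S.length).foldl (fun c _ => pvSweep S c) [x]) := by
  have key : ∀ k : Nat,
      pvClosed S ((List.range k).foldl (fun c _ => pvSweep S c) [x])
      ∨ k + 1 ≤ ((List.range k).foldl (fun c _ => pvSweep S c) [x]).length := by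
    intro k
    induction k with
    | zero => right; simp
    | succ k ih =>
      rw [List.range_succ, List.foldl_append, List.foldl_cons, List.foldl_nil]
      by_cases hcl : pvClosed S ((List.range k).foldl (fun c _ => pvSweep S c) [x])
      · left
        rw [pvSweep_of_closed S _ hcl S (fun p hp => hp)]
        exact hcl
      · right
        have h1 := pvSweep_grow S _ hcl
        rcases ih with ih | ih
        · exact absurd ih hcl
        · omega
  rcases key S.length with h | h
  · exact h
  · exfalso
    have hinv := pvIter_inv S x S (fun p hp => hp) hx S.length
    have := pvLen_le _ S hinv.2.1 hinv.1
    omega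

theorem pvComp_iff_reach (coords : List (List Int)) (S : List (List Int)) (x : List Int)
    (hS : ∀ p ∈ S, p ∈ coords) (hnd : S.Nodup) (hx : x ∈ S)
    (hreachS : ∀ v, pvReach coords x v → v ∈ S) (v : List Int) :
    v ∈ (List.range S.length).foldl (fun c _ => pvSweep S c) [x] ↔ pvReach coords x v := by
  constructor
  · intro hv
    exact (pvIter_inv coords x S hS hx S.length).2.2 v hv
  · intro hr
    have hclosed := pvIter_closed S x hx hnd
    induction hr with
    | refl => exact pvSweepIter_mem S S.length x
    | tail hxu hcrel ih =>
      rename_i u w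
      have hwS : w ∈ S := hreachS w (Relation.ReflTransGen.tail hxu hcrel)
      exact hclosed w hwS u ih (by rw [pvDist_comm]; exact hcrel.2.2)

-- One round: the invariant survives removing the component of the popped point.

theorem pvINV_step (coords : List (List Int)) (x : List Int) (rest : List (List Int))
    (g : PySem.Dict (List Int) (List (List Int))) (hinv : pvINV coords (x :: rest) g) :
    pvINV coords (rest.filter (fun v => decide (v ∉ pvPset [x] g))) (pvBfs [x] rest g).2 := by
  have hx : x ∈ x :: rest := List.mem_cons_self
  have hpiff := pvPset_iff_reach coords (x :: rest) g hinv hx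
  refine ⟨pvSub_trans (pvBfs_snd_sub [x] rest g) hinv.1, ?_, ?_, ?_⟩
  · intro k hk hG0
    have hk' := List.mem_filter.mp hk
    have hkrest : k ∈ rest := hk'.1
    have hknp : k ∉ pvPset [x] g := by simpa using hk'.2
    have hgc : g.contains k = true := hinv.2.1 k (List.mem_cons_of_mem _ hkrest) hG0
    exact pvBfs_snd_keep [x] rest g k hgc hknp
  · intro v hvc hvs u hu
    have hu' := List.mem_filter.mp hu
    have hurest : u ∈ rest := hu'.1
    have hunp : u ∉ pvPset [x] g := by simpa using hu'.2
    by_cases hvS : v ∈ x :: rest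
    · have hrxv : pvReach coords x v := by
        rcases List.mem_cons.mp hvS with rfl | hvrest
        · exact Relation.ReflTransGen.refl
        · have : v ∈ pvPset [x] g := by
            by_contra hnp
            exact hvs (List.mem_filter.mpr ⟨hvrest, by simpa using hnp⟩)
          exact hpiff v |>.mp this
      intro hr
      exact hunp (hpiff u |>.mpr (pvReach_trans coords hrxv hr))
    · exact hinv.2.2.1 v hvc hvS u (List.mem_cons_of_mem _ hurest)
  · exact (List.filter_sublist).trans ((List.sublist_cons_self x rest).trans hinv.2.2.2)

-- Unfolding equations for the two outer loops.

theorem pvLoopA_nil (g : PySem.Dict (List Int) (List (List Int))) (count : Int) :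
    pvLoopA [] g count = count := by
  rw [pvLoopA]

theorem pvLoopA_cons (x : List Int) (rest : List (List Int))
    (g : PySem.Dict (List Int) (List (List Int))) (count : Int) :
    pvLoopA (x :: rest) g count
      = pvLoopA (pvBfs [x] rest g).1 (pvBfs [x] rest g).2 (count + 1) := by
  rw [pvLoopA]

theorem pvLoopB_nil (count : Int) : pvLoopB [] count = count := by
  rw [pvLoopB]

theorem pvLoopB_cons (x : List Int) (rest : List (List Int)) (count : Int) :
    pvLoopB (x :: rest) count
      = pvLoopB ((x :: rest).filter (fun p => decide (p ∉
          (List.range (x :: rest).length).foldl (fun c _ => pvSweep (x :: rest) c) [x])))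
          (count + 1) := by
  rw [pvLoopB]

-- The main simulation: under the invariant both loops return the same count.

theorem pvMain (coords : List (List Int)) : ∀ (n : Nat) (S : List (List Int))
    (g : PySem.Dict (List Int) (List (List Int))) (count : Int),
    S.length ≤ n → pvINV coords S g → pvLoopA S g count = pvLoopB S count := by
  intro n
  induction n with
  | zero =>
    intro S g count hlen _
    have : S = [] := List.eq_nil_of_length_eq_zero (Nat.le_zero.mp hlen)
    subst this
    rw [pvLoopA_nil, pvLoopB_nil]
  | succ n ih =>
    intro S g count hlen hinv
    cases S with
    | nil => rw [pvLoopA_nil, pvLoopB_nil]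
    | cons x rest =>
      have hx : x ∈ x :: rest := List.mem_cons_self
      have hSmem : ∀ p ∈ x :: rest, p ∈ coords := pvINV_S_mem coords (x :: rest) g hinv
      have hnd : (x :: rest).Nodup := pvINV_S_nodup coords (x :: rest) g hinv
      have hreachS : ∀ v, pvReach coords x v → v ∈ x :: rest :=
        fun v h => pvReach_mem_S coords (x :: rest) g hinv hx h
      have hpiff := pvPset_iff_reach coords (x :: rest) g hinv hx
      have hciff := pvComp_iff_reach coords (x :: rest) x hSmem hnd hx hreachS
      have hxcomp : x ∈ (List.range (x :: rest).length).foldl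
          (fun c _ => pvSweep (x :: rest) c) [x] := pvSweepIter_mem _ _ _
      have hfilter : (x :: rest).filter (fun p => decide (p ∉
            (List.range (x :: rest).length).foldl (fun c _ => pvSweep (x :: rest) c) [x]))
          = rest.filter (fun v => decide (v ∉ pvPset [x] g)) := by
        rw [List.filter_cons]
        rw [if_neg (by simpa using hxcomp)]
        apply List.filter_congr
        intro v _
        rw [decide_eq_decide]
        rw [hciff v, hpiff v]
      rw [pvLoopA_cons, pvLoopB_cons, hfilter, pvBfs_fst [x] rest g]
      have hlen' : (rest.filter (fun v => decide (v ∉ pvPset [x] g))).length ≤ n := by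
        have := List.length_filter_le (fun v => decide (v ∉ pvPset [x] g)) rest
        simp only [List.length_cons] at hlen
        omega
      exact ih _ _ (count + 1) hlen' (pvINV_step coords x rest g hinv)

-- B's dedup loop builds exactly set(coordinates) in first-occurrence order.

theorem pvDedup_eq (coords : List (List Int)) :
    coords.foldl (fun pts c => if c ∈ pts then pts else pts ++ [c]) []
      = PySem.Set.ofList coords := by
  rw [PySem.Set.ofList_eq_foldl]
  congr 1
  funext pts c
  by_cases hc : c ∈ pts <;> simp [PySem.Set.add, hc]

theorem pvINV_init (coords : List (List Int)) :
    pvINV coords (PySem.Set.ofList coords) (pvBuildGraph coords) := by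
  refine ⟨pvSub_refl _, fun k _ hk => hk, ?_, List.Sublist.refl _⟩
  intro v hv hvs
  exact absurd ((PySem.Set.mem_ofList coords v).mpr hv) hvs

-- ===== VERDICT (by name: the statement is the Claim_ definition above) =====
theorem find_constellations_spec : Claim_equal_find_constellations := by
  unfold Claim_equal_find_constellations Spec_find_constellations
  intro coords _
  show find_constellations coords = find_constellations_alt coords
  unfold find_constellations find_constellations_alt
  rw [pvDedup_eq]
  exact pvMain coords (PySem.Set.ofList coords).length _ _ 0 le_rfl (pvINV_init coords)
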